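-- pv_equiv track=rewrite | github.com/ViperJuice/Code-Index-MCP | validate_functional_features.py | analyze_build_system
-- ===== SOURCE A (Python) =====
-- def analyze_build_system(shard, build_system):
--     """Analyze build system features."""
--     features = {
--         'dependencies': 0,
--         'build_targets': 0,
--         'configuration': 0
--     }
--
--     for symbol in shard['symbols']:
--         if symbol.get('kind') in ['dependency', 'plugin']:
--             features['dependencies'] += 1
--         elif symbol.get('kind') in ['library', 'executable', 'test-suite', 'benchmark']:
--             features['build_targets'] += 1
--         elif symbol.get('kind') in ['setting', 'package', 'resolver']:
--             features['configuration'] += 1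
--
--     return features
-- ===== SOURCE B (Python) =====
-- _CATEGORY_SETS = [
--     ('dependencies', {'dependency', 'plugin'}),
--     ('build_targets', {'library', 'executable', 'test-suite', 'benchmark'}),
--     ('configuration', {'setting', 'package', 'resolver'}),
-- ]
--
--
-- def analyze_build_system(shard, build_system):
--     """Analyze build system features."""
--     kinds = [symbol.get('kind') for symbol in shard['symbols']]
--     return {name: sum(k in kinds_set for k in kinds)
--             for name, kinds_set in _CATEGORY_SETS}
-- ===== Notes on version B (the rewrite author's own statement) =====
-- stated objective: idiomatic
-- what changed: Instead of one pass threading a mutable counter dict through an if/elif chain, B extracts the list of kinds once and builds the result dict directly with a comprehension, counting each category with a membership sum over static category sets.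
import Mathlib
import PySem

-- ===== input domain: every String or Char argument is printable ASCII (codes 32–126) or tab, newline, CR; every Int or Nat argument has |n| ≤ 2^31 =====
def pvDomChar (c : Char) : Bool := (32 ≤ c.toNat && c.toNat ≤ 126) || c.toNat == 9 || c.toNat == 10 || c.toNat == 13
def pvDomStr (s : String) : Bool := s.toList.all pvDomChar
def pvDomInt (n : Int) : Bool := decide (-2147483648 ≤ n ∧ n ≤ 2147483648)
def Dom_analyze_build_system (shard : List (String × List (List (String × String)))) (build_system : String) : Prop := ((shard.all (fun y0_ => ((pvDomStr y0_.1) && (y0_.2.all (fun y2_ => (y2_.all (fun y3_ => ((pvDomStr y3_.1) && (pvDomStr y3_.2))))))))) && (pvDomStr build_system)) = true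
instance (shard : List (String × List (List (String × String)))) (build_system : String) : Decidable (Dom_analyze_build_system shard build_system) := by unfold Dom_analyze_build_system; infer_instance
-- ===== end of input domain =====

-- B builds the result dict with a comprehension over static category sets, counting each
-- category with a membership sum over the once-extracted kind list, instead of A's single
-- pass threading a mutable counter dict through an if/elif chain (objective: idiomatic).

-- ===== PORT A =====
def analyze_build_system (shard : List (String × List (List (String × String)))) (build_system : String) : List (String × Int) :=
  let features : PySem.Dict String Int :=
    PySem.Dict.mk [("dependencies", 0), ("build_targets", 0), ("configuration", 0)]
  let symbols := ((PySem.Dict.mk shard).get? "symbols").getD []   -- Pre_ guarantees the key exists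
  (symbols.foldl (fun features symbol =>
    let kind := (PySem.Dict.mk symbol).get? "kind"
    if [some "dependency", some "plugin"].contains kind then
      features.modify "dependencies" 0 (· + 1)
    else if [some "library", some "executable", some "test-suite", some "benchmark"].contains kind then
      features.modify "build_targets" 0 (· + 1)
    else if [some "setting", some "package", some "resolver"].contains kind then
      features.modify "configuration" 0 (· + 1)
    else features) features).items

-- ===== PORT B =====
-- sum(k in kinds_set for k in kinds)
def pvCountIn (kinds : List (Option String)) (cat : List (Option String)) : Int :=
  (kinds.map (fun k => if cat.contains k then (1 : Int) else 0)).sum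

def analyze_build_system_alt (shard : List (String × List (List (String × String)))) (build_system : String) : List (String × Int) :=
  let kinds := (((PySem.Dict.mk shard).get? "symbols").getD []).map
    (fun symbol => (PySem.Dict.mk symbol).get? "kind")
  [("dependencies", pvCountIn kinds [some "dependency", some "plugin"]),
   ("build_targets", pvCountIn kinds [some "library", some "executable", some "test-suite", some "benchmark"]),
   ("configuration", pvCountIn kinds [some "setting", some "package", some "resolver"])]

-- ===== PRECONDITION & SPEC =====
-- A (and B) raise KeyError when the shard has no 'symbols' key; Pre_ requires it to be present.
def Pre_analyze_build_system (shard : List (String × List (List (String × String)))) (build_system : String) : Prop :=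
  ((PySem.Dict.mk shard).get? "symbols").isSome = true
instance (shard : List (String × List (List (String × String)))) (build_system : String) : Decidable (Pre_analyze_build_system shard build_system) := by unfold Pre_analyze_build_system; infer_instance

def pvWitness_analyze_build_system : (List (String × List (List (String × String)))) × String :=
  ([("symbols", [[("kind", "plugin")], [("kind", "library")]])], "cargo")

def Spec_analyze_build_system (shard : List (String × List (List (String × String)))) (build_system : String) (out : List (String × Int)) : Prop := out = analyze_build_system_alt shard build_system
instance (shard : List (String × List (List (String × String)))) (build_system : String) (out : List (String × Int)) : Decidable (Spec_analyze_build_system shard build_system out) := by unfold Spec_analyze_build_system; infer_instance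

-- ===== CLAIM (what is proved, stated in full; the proofs are below) =====
def Claim_equal_analyze_build_system : Prop := ∀ (shard : List (String × List (List (String × String)))) (build_system : String), Dom_analyze_build_system shard build_system → Pre_analyze_build_system shard build_system → Spec_analyze_build_system shard build_system (analyze_build_system shard build_system)

-- ===== LEMMAS AND PROOFS =====

-- abbreviation for the 3-key counter state of A's loop
def pvD3 (x y z : Int) : PySem.Dict String Int :=
  PySem.Dict.mk [("dependencies", x), ("build_targets", y), ("configuration", z)]

theorem pvCountIn_cons (k : Option String) (ks cat : List (Option String)) :
    pvCountIn (k :: ks) cat = (if cat.contains k then (1 : Int) else 0) + pvCountIn ks cat := by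
  simp [pvCountIn]

def pvStep (features : PySem.Dict String Int) (symbol : List (String × String)) : PySem.Dict String Int :=
  let kind := (PySem.Dict.mk symbol).get? "kind"
  if [some "dependency", some "plugin"].contains kind then
    features.modify "dependencies" 0 (· + 1)
  else if [some "library", some "executable", some "test-suite", some "benchmark"].contains kind then
    features.modify "build_targets" 0 (· + 1)
  else if [some "setting", some "package", some "resolver"].contains kind then
    features.modify "configuration" 0 (· + 1)
  else features

theorem pvModDep (x y z : Int) : (pvD3 x y z).modify "dependencies" 0 (· + 1) = pvD3 (x + 1) y z := rfl

theorem pvModTgt (x y z : Int) : (pvD3 x y z).modify "build_targets" 0 (· + 1) = pvD3 x (y + 1) z := rfl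

theorem pvModCfg (x y z : Int) : (pvD3 x y z).modify "configuration" 0 (· + 1) = pvD3 x y (z + 1) := rfl

theorem pvDisj12 (k : Option String)
    (h1 : [some "dependency", some "plugin"].contains k = true)
    (h2 : [some "library", some "executable", some "test-suite", some "benchmark"].contains k = true) : False := by
  simp at h1 h2; rcases h1 with rfl | rfl <;> simp at h2

theorem pvDisj13 (k : Option String)
    (h1 : [some "dependency", some "plugin"].contains k = true)
    (h3 : [some "setting", some "package", some "resolver"].contains k = true) : False := by
  simp at h1 h3; rcases h1 with rfl | rfl <;> simp at h3

theorem pvDisj23 (k : Option String)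
    (h2 : [some "library", some "executable", some "test-suite", some "benchmark"].contains k = true)
    (h3 : [some "setting", some "package", some "resolver"].contains k = true) : False := by
  simp at h2 h3; rcases h2 with rfl | rfl | rfl | rfl <;> simp at h3

theorem pvInvariant (symbols : List (List (String × String))) :
    ∀ x y z : Int,
      symbols.foldl pvStep (pvD3 x y z) =
        pvD3
          (x + pvCountIn (symbols.map (fun s => (PySem.Dict.mk s).get? "kind")) [some "dependency", some "plugin"])
          (y + pvCountIn (symbols.map (fun s => (PySem.Dict.mk s).get? "kind")) [some "library", some "executable", some "test-suite", some "benchmark"])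
          (z + pvCountIn (symbols.map (fun s => (PySem.Dict.mk s).get? "kind")) [some "setting", some "package", some "resolver"]) := by
  induction symbols with
  | nil => intro x y z; simp [pvCountIn]
  | cons s rest ih =>
    intro x y z
    simp only [List.foldl_cons, List.map_cons, pvCountIn_cons]
    show List.foldl pvStep (pvStep (pvD3 x y z) s) rest = _
    rw [show pvStep (pvD3 x y z) s =
        (let kind := (PySem.Dict.mk s).get? "kind"
         if [some "dependency", some "plugin"].contains kind then
           (pvD3 x y z).modify "dependencies" 0 (· + 1)
         else if [some "library", some "executable", some "test-suite", some "benchmark"].contains kind then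
           (pvD3 x y z).modify "build_targets" 0 (· + 1)
         else if [some "setting", some "package", some "resolver"].contains kind then
           (pvD3 x y z).modify "configuration" 0 (· + 1)
         else pvD3 x y z) from rfl]
    generalize (PySem.Dict.mk s).get? "kind" = k
    simp only []
    split_ifs <;>
      first
        | (exfalso; exact pvDisj12 k ‹_› ‹_›)
        | (exfalso; exact pvDisj13 k ‹_› ‹_›)
        | (exfalso; exact pvDisj23 k ‹_› ‹_›)
        | (first | rw [pvModDep, ih] | rw [pvModTgt, ih] | rw [pvModCfg, ih] | rw [ih]
           simp only [pvD3, PySem.Dict.mk.injEq, List.cons.injEq, Prod.mk.injEq, true_and, and_true]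
           omega)

-- ===== VERDICT (by name: the statement is the Claim_ definition above) =====
theorem analyze_build_system_spec : Claim_equal_analyze_build_system := by
  intro shard build_system _ _
  show analyze_build_system shard build_system = analyze_build_system_alt shard build_system
  simp only [analyze_build_system, analyze_build_system_alt]
  rw [show (fun (features : PySem.Dict String Int) (symbol : List (String × String)) =>
        let kind := (PySem.Dict.mk symbol).get? "kind"
        if [some "dependency", some "plugin"].contains kind then
          features.modify "dependencies" 0 (· + 1)
        else if [some "library", some "executable", some "test-suite", some "benchmark"].contains kind then
          features.modify "build_targets" 0 (· + 1)
        else if [some "setting", some "package", some "resolver"].contains kind then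
          features.modify "configuration" 0 (· + 1)
        else features) = pvStep from rfl]
  rw [show PySem.Dict.mk [("dependencies", (0:Int)), ("build_targets", 0), ("configuration", 0)] = pvD3 0 0 0 from rfl]
  rw [pvInvariant]
  simp [pvD3]
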